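-- pv_equiv track=rewrite | github.com/reecewayt/rvFPGA | RVfpgaEL2/RVfpga_Boolean/apps/rvfpga_sha3/tools/sha3_uart_config.py | compute_max_chunk_size
-- ===== SOURCE A (Python) =====
-- def compute_max_chunk_size(uart_cmd_max: int) -> int:
--     """Compute max DATASTR payload size for a given UART command buffer limit.
--
--     Uses the same exact budgeting as firmware:
--     command format is "DATASTR <len>:<payload>" and line parsing allows at most
--     `uart_cmd_max - 1` characters before the newline terminator.
--     """
--     max_line_chars = max(0, uart_cmd_max - 1)
--     fixed_chars = 9  # "DATASTR " + ':'
--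
--     payload_max = max_line_chars - fixed_chars
--     if payload_max <= 0:
--         return 0
--
--     while payload_max > 0:
--         digits = len(str(payload_max))
--         if fixed_chars + digits + payload_max <= max_line_chars:
--             return payload_max
--         payload_max -= 1
--
--     return 0
-- ===== SOURCE B (Python) =====
-- def compute_max_chunk_size(uart_cmd_max: int) -> int:
--     """Closed-form: the best payload is budget - digits(budget), or one more when
--     the digit count allows it; no scanning loop."""
--     budget = max(0, uart_cmd_max - 1) - 9
--     if budget <= 0:
--         return 0
--     cand = budget - len(str(budget))
--     if cand + 1 + len(str(cand + 1)) <= budget: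
--         return cand + 1
--     return cand
-- ===== Notes on version B (the rewrite author's own statement) =====
-- stated objective: simpler
-- what changed: Replaces A's decrementing while-loop scan for the largest feasible payload by a closed-form candidate budget - len(str(budget)) with a single +1 adjustment check, eliminating the loop entirely.
import Mathlib
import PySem

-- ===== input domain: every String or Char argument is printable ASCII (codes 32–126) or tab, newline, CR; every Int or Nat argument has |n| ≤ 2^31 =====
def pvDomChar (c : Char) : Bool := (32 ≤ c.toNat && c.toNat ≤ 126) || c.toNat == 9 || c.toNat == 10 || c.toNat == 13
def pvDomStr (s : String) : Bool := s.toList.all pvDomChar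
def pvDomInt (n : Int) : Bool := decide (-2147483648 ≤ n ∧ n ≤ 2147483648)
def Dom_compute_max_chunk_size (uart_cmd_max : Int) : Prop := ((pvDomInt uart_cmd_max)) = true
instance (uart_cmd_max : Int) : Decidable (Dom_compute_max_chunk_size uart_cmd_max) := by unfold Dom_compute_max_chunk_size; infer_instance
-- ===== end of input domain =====

-- B replaces A's decrementing scan for the largest feasible payload by a closed-form
-- candidate budget - len(str(budget)) with a single +1 adjustment check (objective: simpler).

-- ===== PORT A =====
-- the `while payload_max > 0: … payload_max -= 1` loop, fuel = initial payload_max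
def pvALoop (maxLine : Int) : Nat → Int → Int
  | 0, _ => 0
  | f + 1, p =>
    if p > 0 then
      if 9 + PySem.Str.len (PySem.Int.toStr p) + p ≤ maxLine then p
      else pvALoop maxLine f (p - 1)
    else 0

def compute_max_chunk_size (uart_cmd_max : Int) : Int :=
  let max_line_chars := max 0 (uart_cmd_max - 1)
  let payload_max := max_line_chars - 9
  if payload_max ≤ 0 then 0
  else pvALoop max_line_chars payload_max.toNat payload_max

-- ===== PORT B =====
def compute_max_chunk_size_alt (uart_cmd_max : Int) : Int :=
  let budget := max 0 (uart_cmd_max - 1) - 9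
  if budget ≤ 0 then 0
  else
    let cand := budget - PySem.Str.len (PySem.Int.toStr budget)
    if cand + 1 + PySem.Str.len (PySem.Int.toStr (cand + 1)) ≤ budget then cand + 1
    else cand

-- ===== PRECONDITION & SPEC =====
def Spec_compute_max_chunk_size (uart_cmd_max : Int) (out : Int) : Prop := out = compute_max_chunk_size_alt uart_cmd_max
instance (uart_cmd_max : Int) (out : Int) : Decidable (Spec_compute_max_chunk_size uart_cmd_max out) := by unfold Spec_compute_max_chunk_size; infer_instance

-- ===== CLAIM (what is proved, stated in full; the proofs are below) =====
def Claim_equal_compute_max_chunk_size : Prop := ∀ (uart_cmd_max : Int), Dom_compute_max_chunk_size uart_cmd_max → Spec_compute_max_chunk_size uart_cmd_max (compute_max_chunk_size uart_cmd_max)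

-- ===== LEMMAS AND PROOFS =====

-- exact length of Nat.toDigits (Mathlib only has the upper bound `Nat.toDigits_length`)
lemma pv_toDigitsCore_len : ∀ (f n : Nat) (l : List Char), n < f →
    (Nat.toDigitsCore 10 f n l).length = Nat.log 10 n + 1 + l.length := by
  intro f
  induction f with
  | zero => intro n l h; omega
  | succ f ih =>
    intro n l h
    simp only [Nat.toDigitsCore]
    by_cases h10 : n / 10 = 0
    · have hn10 : n < 10 := by omega
      have hl0 : Nat.log 10 n = 0 := Nat.log_eq_zero_iff.mpr (Or.inl hn10)
      simp [h10, hl0]; omega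
    · have hnge : 10 ≤ n := by
        by_contra hc
        exact h10 (Nat.div_eq_of_lt (by omega))
      rw [if_neg h10,
        ih (n / 10) (Nat.digitChar (n % 10) :: l)
          (by have := Nat.div_lt_self (by omega : 0 < n) (by omega : 1 < 10); omega),
        List.length_cons]
      have hpos : 0 < Nat.log 10 n := Nat.log_pos (by omega) hnge
      have hdiv : Nat.log 10 (n / 10) = Nat.log 10 n - 1 := Nat.log_div_base 10 n
      omega

lemma pv_toDigits_len (n : Nat) : (Nat.toDigits 10 n).length = Nat.log 10 n + 1 := by
  have := pv_toDigitsCore_len (n + 1) n [] (by omega)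
  simpa [Nat.toDigits] using this

-- len(str(p)) for positive p, as an Int
lemma pv_str_len (p : Int) (hp : 0 < p) :
    PySem.Str.len (PySem.Int.toStr p) = ((Nat.log 10 p.toNat + 1 : Nat) : Int) := by
  rw [PySem.Str.len_eq, PySem.Int.toList_toStr]
  simp [PySem.Int.toChars, not_lt.mpr hp.le, pv_toDigits_len]

-- digit-count jump bound: any q at least budget - digits(budget) + 2 has at least digits(budget) - 1 digits
lemma pv_log_lower (N q : Nat) (hN : 1 ≤ N) (hq : N - Nat.log 10 N + 1 ≤ q) :
    Nat.log 10 N ≤ Nat.log 10 q + 1 := by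
  set k := Nat.log 10 N with hk
  rcases Nat.eq_zero_or_pos k with h0 | hkpos
  · omega
  · have hpow : 10 ^ k ≤ N := Nat.pow_log_le_self 10 (by omega)
    have hsmall : k - 1 < 10 ^ (k - 1) := Nat.lt_pow_self (by omega)
    have hten : 10 ^ k = 10 * 10 ^ (k - 1) := by
      conv_lhs => rw [show k = (k - 1) + 1 by omega]
      ring
    have hq' : 10 ^ (k - 1) ≤ q := by omega
    have := Nat.log_mono_right (b := 10) hq'
    rw [Nat.log_pow (by omega)] at this
    omega

-- the scan loop returns `ans` whenever `ans` is feasible (or 0) and everything strictly above it up to the start is not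
lemma pv_loop_eq (mL ans : Int) (h0 : 0 ≤ ans)
    (hfe : 0 < ans → 9 + PySem.Str.len (PySem.Int.toStr ans) + ans ≤ mL)
    (hnf : ∀ q, ans < q → q ≤ mL - 9 → ¬ (9 + PySem.Str.len (PySem.Int.toStr q) + q ≤ mL)) :
    ∀ (f : Nat) (p : Int), ans ≤ p → p ≤ mL - 9 → p.toNat ≤ f → pvALoop mL f p = ans := by
  intro f
  induction f with
  | zero => intro p h1 h2 h3; simp only [pvALoop]; omega
  | succ f ih =>
    intro p h1 h2 h3
    simp only [pvALoop]
    by_cases hp : p > 0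
    · rw [if_pos hp]
      by_cases hfeas : 9 + PySem.Str.len (PySem.Int.toStr p) + p ≤ mL
      · rw [if_pos hfeas]
        by_contra hne
        exact hnf p (by omega) h2 hfeas
      · rw [if_neg hfeas]
        have hlt : ans < p := by
          rcases lt_or_eq_of_le h1 with h | h
          · exact h
          · exact absurd (hfe (h ▸ hp)) (h ▸ hfeas)
        exact ih (p - 1) (by omega) (by omega) (by omega)
    · rw [if_neg hp]; omega

-- ===== VERDICT (by name: the statement is the Claim_ definition above) =====
theorem compute_max_chunk_size_spec : Claim_equal_compute_max_chunk_size := by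
  intro u _
  unfold Spec_compute_max_chunk_size compute_max_chunk_size compute_max_chunk_size_alt
  set mL := max 0 (u - 1) with hmL
  set B := mL - 9 with hB
  by_cases hb : B ≤ 0
  · rw [if_pos hb, if_pos hb]
  · rw [if_neg hb, if_neg hb]
    have hB1 : 1 ≤ B := by omega
    set N := B.toNat with hN
    have hN1 : 1 ≤ N := by omega
    have hBN : (N : Int) = B := by omega
    set k : Nat := Nat.log 10 N with hk
    have hdB : PySem.Str.len (PySem.Int.toStr B) = (k : Int) + 1 := by
      rw [pv_str_len B (by omega)]; push_cast; rfl
    rw [hdB]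
    set cand := B - ((k : Int) + 1) with hcand
    have hklt : k + 1 ≤ N := by
      have := Nat.log_lt_self 10 (by omega : N ≠ 0)
      omega
    have hcand0 : 0 ≤ cand := by omega
    -- feasibility of cand when positive
    have hfcand : 0 < cand → 9 + PySem.Str.len (PySem.Int.toStr cand) + cand ≤ mL := by
      intro hc
      rw [pv_str_len cand hc]
      have hmono : Nat.log 10 cand.toNat ≤ k := by
        apply Nat.log_mono_right
        omega
      push_cast
      omega
    -- infeasibility of everything ≥ cand + 2
    have hnf2 : ∀ q, cand + 2 ≤ q → q ≤ B → ¬ (9 + PySem.Str.len (PySem.Int.toStr q) + q ≤ mL) := by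
      intro q hq1 hq2 hfeas
      rw [pv_str_len q (by omega)] at hfeas
      have hlow : k ≤ Nat.log 10 q.toNat + 1 := pv_log_lower N q.toNat hN1 (by omega)
      push_cast at hfeas
      omega
    by_cases hc1 : cand + 1 + PySem.Str.len (PySem.Int.toStr (cand + 1)) ≤ B
    · rw [if_pos hc1]
      exact pv_loop_eq mL (cand + 1) (by omega)
        (fun _ => by omega)
        (fun q hq1 hq2 => hnf2 q (by omega) (by omega)) B.toNat B (by omega) (by omega) (by omega)
    · rw [if_neg hc1]
      exact pv_loop_eq mL cand hcand0
        hfcand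
        (fun q hq1 hq2 hfeas => by
          rcases eq_or_lt_of_le (by omega : cand + 1 ≤ q) with h | h
          · apply hc1; rw [← h] at hfeas; omega
          · exact hnf2 q (by omega) (by omega) hfeas) B.toNat B (by omega) (by omega) (by omega)
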